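-- pv_equiv track=rewrite | github.com/TomDamri1/CureonaApp | server/help_funcs.py | calculate_x_for_graph
-- ===== SOURCE A (Python) =====
-- def calculate_x_for_graph(business):
--     optimal_x = 60
--     if optimal_x % business['minutes_intervals']  == 0:
--         return optimal_x
--     else:
--         x = 0
--         while x <= optimal_x:
--             x = x + business['minutes_intervals']
--         return x
-- ===== SOURCE B (Python) =====
-- def calculate_x_for_graph(business):
--     interval = business['minutes_intervals']
--     return -(-60 // interval) * interval
-- ===== Notes on version B (the rewrite author's own statement) =====
-- stated objective: simpler
-- what changed: Replaces the divisibility guard plus accumulation while-loop with one closed-form ceiling expression -(-60 // interval) * interval, which equals A on every input A returns on (including negative divisors of 60, where Python's floor division makes it 60).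
import Mathlib
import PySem

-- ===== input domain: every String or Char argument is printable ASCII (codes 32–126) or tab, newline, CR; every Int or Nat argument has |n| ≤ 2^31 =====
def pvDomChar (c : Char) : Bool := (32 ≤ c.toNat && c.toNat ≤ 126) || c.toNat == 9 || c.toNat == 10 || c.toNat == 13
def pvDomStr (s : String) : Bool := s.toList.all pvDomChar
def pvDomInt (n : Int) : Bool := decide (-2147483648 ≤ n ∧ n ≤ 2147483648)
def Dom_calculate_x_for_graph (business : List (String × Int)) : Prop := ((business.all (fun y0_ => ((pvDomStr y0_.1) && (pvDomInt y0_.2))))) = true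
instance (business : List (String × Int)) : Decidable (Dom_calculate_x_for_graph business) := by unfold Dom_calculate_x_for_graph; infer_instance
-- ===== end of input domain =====

-- B replaces A's guard-plus-while-loop by one closed-form floored-ceiling expression (objective: simpler).

-- ===== PORT A =====
-- the 'while x <= 60: x = x + step' loop, as fuel recursion (under Pre_ any executed loop has
-- step ≥ 1, so fuel 62 is never exhausted: at most 61 iterations occur)
def pvLoopA (step : Int) : Nat → Int → Int
  | 0, x => x
  | n + 1, x => if x ≤ 60 then pvLoopA step n (x + step) else x

def calculate_x_for_graph (business : List (String × Int)) : Int :=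
  -- business['minutes_intervals']; 0 is unreachable under Pre_ (KeyError in Python)
  let interval := ((PySem.Dict.mk business).get? "minutes_intervals").getD 0
  if PySem.Int.mod 60 interval == 0 then 60
  else pvLoopA interval 62 0

-- ===== PORT B =====
def calculate_x_for_graph_alt (business : List (String × Int)) : Int :=
  let interval := ((PySem.Dict.mk business).get? "minutes_intervals").getD 0
  Neg.neg (PySem.Int.floordiv (-60) interval) * interval

-- ===== PRECONDITION & SPEC =====
-- Pre_ excludes exactly the inputs on which A does not return: a missing 'minutes_intervals'
-- key (KeyError), a zero value (ZeroDivisionError), and a negative value not dividing 60, on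
-- which A's while-loop never terminates; everywhere else A returns and B matches it.
def Pre_calculate_x_for_graph (business : List (String × Int)) : Prop :=
  ∃ v : Int, (PySem.Dict.mk business).get? "minutes_intervals" = some v ∧ v ≠ 0 ∧ (0 < v ∨ v ∣ 60)
instance (business : List (String × Int)) : Decidable (Pre_calculate_x_for_graph business) := by
  unfold Pre_calculate_x_for_graph
  rcases h : (PySem.Dict.mk business).get? "minutes_intervals" with _ | v
  · exact .isFalse (by simp)
  · exact decidable_of_iff (v ≠ 0 ∧ (0 < v ∨ v ∣ 60)) (by simp)

def pvWitness_calculate_x_for_graph : (List (String × Int)) := [("minutes_intervals", 25)]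

def Spec_calculate_x_for_graph (business : List (String × Int)) (out : Int) : Prop := out = calculate_x_for_graph_alt business
instance (business : List (String × Int)) (out : Int) : Decidable (Spec_calculate_x_for_graph business out) := by unfold Spec_calculate_x_for_graph; infer_instance

-- ===== CLAIM =====
def Claim_equal_calculate_x_for_graph : Prop := ∀ (business : List (String × Int)), Dom_calculate_x_for_graph business → Pre_calculate_x_for_graph business → Spec_calculate_x_for_graph business (calculate_x_for_graph business)

-- ===== LEMMAS AND PROOFS =====

-- core arithmetic fact: for positive v the two computations agree
theorem pv_core_pos (v : Int) (hv : 0 < v) :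
    (if PySem.Int.mod 60 v == 0 then (60 : Int) else pvLoopA v 62 0)
      = -(PySem.Int.floordiv (-60) v) * v := by
  by_cases hle : v ≤ 61
  · interval_cases v <;> decide
  · rw [not_le] at hle
    have hmod : ¬ (PySem.Int.mod 60 v == 0) := by
      have h60 : PySem.Int.mod 60 v = 60 := by
        have hsum := PySem.Int.floordiv_mul_add_mod 60 v
        have hq : PySem.Int.floordiv 60 v = 0 := by
          rw [PySem.Int.floordiv_eq_iff_of_pos]
          · constructor <;> nlinarith
          · exact hv
        nlinarith [hsum, hq]
      simp [h60]
    rw [if_neg hmod]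
    have hdiv : PySem.Int.floordiv (-60) v = -1 := by
      rw [PySem.Int.floordiv_eq_iff_of_pos]
      · constructor <;> nlinarith
      · exact hv
    rw [hdiv]
    -- the loop: x = 0 ≤ 60, then x = v > 60 exits and is returned
    have hx : ¬ (v ≤ 60) := by omega
    simp [pvLoopA, hx]

-- for negative v dividing 60 both sides return 60
theorem pv_core_neg (v : Int) (hneg : v < 0) (hdvd : v ∣ 60) :
    (if PySem.Int.mod 60 v == 0 then (60 : Int) else pvLoopA v 62 0)
      = -(PySem.Int.floordiv (-60) v) * v := by
  have hb1 : -60 ≤ v := by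
    have : -v ≤ 60 := Int.le_of_dvd (by norm_num) ((neg_dvd).mpr hdvd)
    omega
  interval_cases v <;> revert hdvd <;> decide

-- ===== VERDICT =====
theorem calculate_x_for_graph_spec : Claim_equal_calculate_x_for_graph := by
  intro business _ hpre
  obtain ⟨v, hget, hv0, hor⟩ := hpre
  show calculate_x_for_graph business = calculate_x_for_graph_alt business
  unfold calculate_x_for_graph calculate_x_for_graph_alt
  rw [hget]
  simp only [Option.getD_some]
  rcases lt_or_gt_of_ne hv0 with hneg | hpos
  · exact pv_core_neg v hneg (hor.resolve_left (by omega))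
  · exact pv_core_pos v hpos
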